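-- pv_equiv track=rewrite | github.com/OdoiJ/Fathom | learn3.py | countVowel
-- ===== SOURCE A (Python) =====
-- def countVowel(m):
--     vowels = 'AEIOUaeiou'
--     vowel = ""
--     counter = 0
--     for x in m:
--         if x in vowels:
--             if x in vowel:
--                 counter += 1
--             else:
--                 vowel += str(x)
--
--
--     return (vowel, counter)
-- ===== SOURCE B (Python) =====
-- def countVowel(m):
--     v = [x for x in m if x in 'AEIOUaeiou']
--     d = ''.join(dict.fromkeys(v))
--     return (d, len(v) - len(d))
-- ===== Notes on version B (the rewrite author's own statement) =====
-- stated objective: simpler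
-- what changed: Replaces A's single pass with an incremental seen-string and repeat counter by staged passes with no counting at all: filter the vowel occurrences, deduplicate them in first-seen order via dict.fromkeys, and obtain the repeat count arithmetically as len(occurrences) - len(distinct).
import Mathlib
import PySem

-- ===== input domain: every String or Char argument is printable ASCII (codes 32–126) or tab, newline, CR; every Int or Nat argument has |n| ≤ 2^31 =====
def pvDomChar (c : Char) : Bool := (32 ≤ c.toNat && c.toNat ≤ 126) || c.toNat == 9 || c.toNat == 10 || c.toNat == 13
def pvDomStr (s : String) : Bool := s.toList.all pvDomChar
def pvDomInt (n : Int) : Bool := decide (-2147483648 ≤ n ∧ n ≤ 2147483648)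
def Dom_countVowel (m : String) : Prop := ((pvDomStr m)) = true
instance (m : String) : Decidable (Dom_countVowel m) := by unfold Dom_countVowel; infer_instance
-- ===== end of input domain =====

-- B replaces A's incremental seen-string/repeat-counter loop by staged passes with no
-- counting: filter vowels, dedup in first-seen order, subtract lengths. Objective: simpler.

-- ===== PORT A =====
-- 'x in vowels' / 'x in vowel' are single-char membership in a string: exact as List Char membership.
def countVowel (m : String) : String × Int :=
  let vowels : List Char := "AEIOUaeiou".toList
  let st := m.toList.foldl
    (fun (st : List Char × Int) x =>
      if x ∈ vowels then
        if x ∈ st.1 then (st.1, st.2 + 1) else (st.1 ++ [x], st.2)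
      else st)
    ([], 0)
  (String.ofList st.1, st.2)

-- ===== PORT B =====
-- dict.fromkeys keeps first occurrences in order: exact as PySem.Set.ofList.
def countVowel_alt (m : String) : String × Int :=
  let v := m.toList.filter (fun x => decide (x ∈ "AEIOUaeiou".toList))
  let d := PySem.Set.ofList v
  (String.ofList d, (v.length : Int) - (d.length : Int))

-- ===== PRECONDITION & SPEC =====
def Spec_countVowel (m : String) (out : String × Int) : Prop := out = countVowel_alt m
instance (m : String) (out : String × Int) : Decidable (Spec_countVowel m out) := by unfold Spec_countVowel; infer_instance

-- ===== CLAIM (what is proved, stated in full; the proofs are below) =====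
def Claim_equal_countVowel : Prop := ∀ (m : String), Dom_countVowel m → Spec_countVowel m (countVowel m)

-- ===== LEMMAS AND PROOFS =====

-- A's loop over the vowel occurrences: the seen list is the running dedup and the
-- counter is determined by the lengths.
theorem afold (l v : List Char) (c : Int) :
    l.foldl (fun (st : List Char × Int) x =>
      if x ∈ st.1 then (st.1, st.2 + 1) else (st.1 ++ [x], st.2)) (v, c)
    = (PySem.Set.update v l,
       c + (l.length : Int) + (v.length : Int) - ((PySem.Set.update v l).length : Int)) := by
  induction l generalizing v c with
  | nil => simp [PySem.Set.update]
  | cons x t ih =>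
    by_cases hx : x ∈ v
    · rw [List.foldl_cons, if_pos hx, ih, PySem.Set.update_cons, PySem.Set.add_of_mem hx]
      simp; ring
    · rw [List.foldl_cons, if_neg hx, ih, PySem.Set.update_cons, PySem.Set.add_of_not_mem hx]
      simp; ring

-- a loop whose body fires only on members of vs is a loop over the filtered list
theorem foldl_guard {A B : Type} [DecidableEq B] (vs : List B) (f : A → B → A)
    (l : List B) : ∀ (b : A),
    l.foldl (fun a x => if x ∈ vs then f a x else a) b
      = (l.filter (fun x => decide (x ∈ vs))).foldl f b := by
  induction l with
  | nil => intro b; rfl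
  | cons x t ih =>
    intro b
    by_cases hx : x ∈ vs
    · simp [hx, ih]
    · simp [hx, ih]

theorem countVowel_eqn (m : String) : countVowel m = countVowel_alt m := by
  unfold countVowel countVowel_alt
  dsimp only
  rw [foldl_guard "AEIOUaeiou".toList
        (fun (st : List Char × Int) x =>
          if x ∈ st.1 then (st.1, st.2 + 1) else (st.1 ++ [x], st.2)) m.toList,
      afold, PySem.Set.update_nil_left]
  simp

-- ===== VERDICT (by name: the statement is the Claim_ definition above) =====
theorem countVowel_spec : Claim_equal_countVowel := by
  intro m _
  unfold Spec_countVowel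
  exact countVowel_eqn m
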